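-- pv_equiv track=rewrite | github.com/mhulden/pyfoma | src/pyfoma/lexd.py | _split_escaped_fields
-- ===== SOURCE A (Python) =====
-- from typing import List, Tuple, Dict, Optional, Iterable, Set
--
-- def _split_escaped_fields(line: str) -> List[str]:
--     r"""Split a line into whitespace-separated fields, honoring backslash escapes.
--
--     Example: 'ya\ ngáí <tag>:' -> ['ya ngáí', '<tag>:']
--     Backslash escapes the next character (space, '#', backslash, etc.).
--     """
--     fields: List[str] = []
--     buf: List[str] = []
--     esc = False
--     in_ws = True
--     for ch in line:
--         if esc:
--             buf.append(ch)
--             esc = False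
--             in_ws = False
--             continue
--         if ch == "\\":
--             esc = True
--             continue
--         if ch.isspace():
--             if not in_ws:
--                 fields.append("".join(buf))
--                 buf = []
--                 in_ws = True
--             continue
--         buf.append(ch)
--         in_ws = False
--     if esc:
--         buf.append("\\")
--     if buf:
--         fields.append("".join(buf))
--     return fields
-- ===== SOURCE B (Python) =====
-- def _split_escaped_fields(line):
--     # Two-pass: first tag every resulting character with a separator flag
--     # (escaped characters are never separators; a dangling trailing backslash
--     # becomes a literal '\'), then collect maximal non-separator runs.
--     tagged = []
--     i, n = 0, len(line)
--     while i < n: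
--         ch = line[i]
--         if ch == "\\":
--             if i + 1 < n:
--                 tagged.append((line[i + 1], False))
--                 i += 2
--             else:
--                 tagged.append(("\\", False))
--                 i += 1
--         else:
--             tagged.append((ch, ch.isspace()))
--             i += 1
--     fields = []
--     j, m = 0, len(tagged)
--     while j < m:
--         if tagged[j][1]:
--             j += 1
--             continue
--         k = j
--         while k < m and not tagged[k][1]:
--             k += 1
--         fields.append("".join(c for c, _ in tagged[j:k]))
--         j = k
--     return fields
-- ===== Notes on version B (the rewrite author's own statement) =====
-- stated objective: alternative
-- what changed: Replaced the single stateful pass (esc/in_ws flags with an inline flushed buffer) by two distinct passes: first build a list of (char, is_separator) pairs consuming backslash escapes, then collect maximal non-separator runs into fields.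
import Mathlib
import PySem

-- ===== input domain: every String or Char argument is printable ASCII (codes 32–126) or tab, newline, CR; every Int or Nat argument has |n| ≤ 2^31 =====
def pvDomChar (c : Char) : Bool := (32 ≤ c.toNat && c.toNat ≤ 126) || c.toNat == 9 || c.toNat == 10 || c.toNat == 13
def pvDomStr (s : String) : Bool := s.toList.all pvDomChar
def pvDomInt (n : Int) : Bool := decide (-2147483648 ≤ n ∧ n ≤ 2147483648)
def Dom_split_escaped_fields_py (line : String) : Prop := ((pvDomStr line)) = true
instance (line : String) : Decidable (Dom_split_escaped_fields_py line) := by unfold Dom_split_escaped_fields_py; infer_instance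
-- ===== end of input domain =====

-- B rewrites A's single stateful pass as two passes (tag characters with a separator flag, then
-- collect maximal non-separator runs); objective: alternative decomposition, same cost.

-- ===== PORT A =====
-- A's loop body, state = (fields, buf, esc, in_ws), branches in A's order
def pvStepA (st : List String × List Char × Bool × Bool) (ch : Char) :
    List String × List Char × Bool × Bool :=
  let (fields, buf, esc, in_ws) := st
  if esc then (fields, buf ++ [ch], false, false)
  else if ch = '\\' then (fields, buf, true, in_ws)
  else if PySem.Chars.isspace ch then
    if !in_ws then (fields ++ [String.mk buf], [], esc, true)
    else (fields, buf, esc, in_ws)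
  else (fields, buf ++ [ch], esc, false)

-- A's code after the loop: 'if esc: buf.append("\\")' then 'if buf: fields.append("".join(buf))'
def pvFinishA (st : List String × List Char × Bool × Bool) : List String :=
  let buf := if st.2.2.1 then st.2.1 ++ ['\\'] else st.2.1
  if buf ≠ [] then st.1 ++ [String.mk buf] else st.1

def split_escaped_fields_py (line : String) : List String :=
  pvFinishA (line.toList.foldl pvStepA ([], [], false, true))

-- ===== PORT B =====
-- pass 1 of Source B: the index loop consuming '\' escapes; the i+2 advance is the
-- structural recursion matching two characters
def pvTag : List Char → List (Char × Bool)
  | [] => []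
  | c :: rest =>
    if c = '\\' then
      match rest with
      | [] => [('\\', false)]
      | c' :: rest' => (c', false) :: pvTag rest'
    else (c, PySem.Chars.isspace c) :: pvTag rest

-- pass 2 of Source B: the run-scanning loop; the inner 'while k < m and not tagged[k][1]'
-- scan is takeWhile/dropWhile on the not-separator predicate (exact: same scan)
def pvGroup : List (Char × Bool) → List String
  | [] => []
  | (c, sep) :: rest =>
    if sep then pvGroup rest
    else
      String.mk (c :: (rest.takeWhile (fun t => !t.2)).map Prod.fst)
        :: pvGroup (rest.dropWhile (fun t => !t.2))
termination_by ts => ts.length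
decreasing_by
  · simp
  · exact Nat.lt_succ_of_le (List.length_dropWhile_le _ _)

def split_escaped_fields_py_alt (line : String) : List String :=
  pvGroup (pvTag line.toList)

-- ===== PRECONDITION & SPEC =====
def Spec_split_escaped_fields_py (line : String) (out : List String) : Prop := out = split_escaped_fields_py_alt line
instance (line : String) (out : List String) : Decidable (Spec_split_escaped_fields_py line out) := by unfold Spec_split_escaped_fields_py; infer_instance

-- ===== CLAIM (what is proved, stated in full; the proofs are below) =====
def Claim_equal_split_escaped_fields_py : Prop := ∀ (line : String), Dom_split_escaped_fields_py line → Spec_split_escaped_fields_py line (split_escaped_fields_py line)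

-- ===== LEMMAS AND PROOFS =====

theorem pvTag_nil : pvTag [] = [] := by simp [pvTag]

theorem pvTag_bs_nil : pvTag ['\\'] = [('\\', false)] := by simp [pvTag]

theorem pvTag_bs_cons (c : Char) (rest : List Char) :
    pvTag ('\\' :: c :: rest) = (c, false) :: pvTag rest := by simp [pvTag]

theorem pvTag_cons (c : Char) (rest : List Char) (hc : c ≠ '\\') :
    pvTag (c :: rest) = (c, PySem.Chars.isspace c) :: pvTag rest := by
  rw [pvTag.eq_def]
  simp [hc]

theorem pvGroup_nil : pvGroup [] = [] := by rw [pvGroup]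

theorem pvGroup_sep (c : Char) (rest : List (Char × Bool)) :
    pvGroup ((c, true) :: rest) = pvGroup rest := by rw [pvGroup]; simp

theorem pvGroup_nonsep (c : Char) (rest : List (Char × Bool)) :
    pvGroup ((c, false) :: rest)
      = String.mk (c :: (rest.takeWhile (fun t => !t.2)).map Prod.fst)
          :: pvGroup (rest.dropWhile (fun t => !t.2)) := by
  rw [pvGroup]; simp

theorem pvTakeWhile_map_false (buf : List Char) (ts : List (Char × Bool)) :
    (buf.map (fun c => (c, false)) ++ ts).takeWhile (fun t => !t.2)
      = buf.map (fun c => (c, false)) ++ ts.takeWhile (fun t => !t.2) := by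
  induction buf with
  | nil => rfl
  | cons b bs ih => simp [ih]

theorem pvDropWhile_map_false (buf : List Char) (ts : List (Char × Bool)) :
    (buf.map (fun c => (c, false)) ++ ts).dropWhile (fun t => !t.2)
      = ts.dropWhile (fun t => !t.2) := by
  induction buf with
  | nil => rfl
  | cons b bs ih => simp [ih]

-- pvGroup on a pending all-non-separator buffer prefixed to a tagged tail
theorem pvGroup_buf (buf : List Char) (ts : List (Char × Bool)) (h : buf ≠ []) :
    pvGroup (buf.map (fun c => (c, false)) ++ ts)
      = String.mk (buf ++ (ts.takeWhile (fun t => !t.2)).map Prod.fst)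
          :: pvGroup (ts.dropWhile (fun t => !t.2)) := by
  cases buf with
  | nil => exact absurd rfl h
  | cons b bs =>
    simp only [List.map_cons, List.cons_append, pvGroup_nonsep,
      pvTakeWhile_map_false, pvDropWhile_map_false, List.map_append, List.map_map]
    simp [Function.comp_def]

-- the loop invariant: running A's fold from (fields, buf, esc = false, in_ws = buf.isEmpty)
-- and finishing equals fields ++ pvGroup of buf (tagged non-separator) followed by pvTag cs
theorem pvLoop_eq (cs : List Char) (fields : List String) (buf : List Char) :
    pvFinishA (cs.foldl pvStepA (fields, buf, false, buf.isEmpty))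
      = fields ++ pvGroup (buf.map (fun c => (c, false)) ++ pvTag cs) := by
  match cs with
  | [] =>
    cases buf with
    | nil => simp [pvFinishA, pvTag_nil, pvGroup_nil]
    | cons b bs =>
      rw [List.foldl_nil, pvTag_nil, pvGroup_buf (b :: bs) [] (by simp)]
      simp [pvFinishA, pvGroup_nil]
  | c :: rest =>
    by_cases hc : c = '\\'
    · subst hc
      cases rest with
      | nil =>
        rw [pvTag_bs_nil,
          show (buf.map (fun c => (c, false))) ++ [('\\', false)]
              = ((buf ++ ['\\']).map (fun c => (c, false))) ++ [] from by simp,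
          pvGroup_buf (buf ++ ['\\']) [] (by simp)]
        simp [pvStepA, pvFinishA, pvGroup_nil]
      | cons c' rest' =>
        have ih := pvLoop_eq rest' fields (buf ++ [c'])
        rw [show (buf ++ [c']).isEmpty = false from by simp] at ih
        rw [pvTag_bs_cons, List.foldl_cons, List.foldl_cons,
          show pvStepA (fields, buf, false, buf.isEmpty) '\\'
              = (fields, buf, true, buf.isEmpty) from by simp [pvStepA],
          show pvStepA (fields, buf, true, buf.isEmpty) c'
              = (fields, buf ++ [c'], false, false) from by simp [pvStepA]]
        simpa [List.map_append] using ih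
    · by_cases hsp : PySem.Chars.isspace c = true
      · rw [pvTag_cons c rest hc, hsp]
        cases buf with
        | nil =>
          have ih := pvLoop_eq rest fields []
          rw [List.foldl_cons,
            show pvStepA (fields, [], false, (List.isEmpty ([] : List Char))) c
                = (fields, [], false, true) from by simp [pvStepA, hc, hsp]]
          rw [show pvGroup ((List.map (fun c => (c, false)) ([] : List Char)) ++ (c, true) :: pvTag rest)
                = pvGroup (pvTag rest) from by simp [pvGroup_sep]]
          simpa using ih
        | cons b bs =>
          have ih := pvLoop_eq rest (fields ++ [String.mk (b :: bs)]) []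
          rw [List.foldl_cons,
            show pvStepA (fields, b :: bs, false, (b :: bs).isEmpty) c
                = (fields ++ [String.mk (b :: bs)], [], false, true) from by simp [pvStepA, hc, hsp],
            pvGroup_buf (b :: bs) ((c, true) :: pvTag rest) (by simp)]
          simpa [pvGroup_sep, List.takeWhile_cons, List.dropWhile_cons] using ih
      · rw [Bool.not_eq_true] at hsp
        rw [pvTag_cons c rest hc, hsp]
        have ih := pvLoop_eq rest fields (buf ++ [c])
        rw [show (buf ++ [c]).isEmpty = false from by simp] at ih
        rw [List.foldl_cons,
          show pvStepA (fields, buf, false, buf.isEmpty) c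
              = (fields, buf ++ [c], false, false) from by simp [pvStepA, hc, hsp]]
        simpa [List.map_append] using ih
termination_by cs.length
decreasing_by all_goals (simp only [List.length_cons]; omega)

-- ===== VERDICT (by name: the statement is the Claim_ definition above) =====
theorem split_escaped_fields_py_spec : Claim_equal_split_escaped_fields_py := by
  intro line _
  unfold Spec_split_escaped_fields_py split_escaped_fields_py split_escaped_fields_py_alt
  simpa using pvLoop_eq line.toList [] []
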